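-- pv_equiv track=rewrite | github.com/amartinez228/longest-unimodal | unimodal.py | find_longest_unimodal
-- ===== SOURCE A (Python) =====
-- def compute_inc(arr):
--     """
--     Compute INC array: length of longest strictly increasing subsequence
--     ending at each position.
--
--     Args:
--         arr: List of integers
--
--     Returns:
--         List where INC[j] = length of longest strictly increasing
--         subsequence ending at position j
--     """
--     n = len(arr)
--     INC = [1] * n  # Initialize all positions to 1
--
--     for j in range(1, n):
--         # Find the maximum INC[i] where i < j and arr[i] < arr[j]
--         max_val = 0
--         for i in range(j):
--             if arr[i] < arr[j]:
--                 max_val = max(max_val, INC[i])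
--         INC[j] = 1 + max_val
--     return INC
--
-- def compute_dec(arr):
--     """
--     Compute DEC array: length of longest strictly decreasing subsequence
--     starting at each position.
--
--     Args:
--         arr: List of integers
--
--     Returns:
--         List where DEC[j] = length of longest strictly decreasing
--         subsequence starting at position j
--     """
--     n = len(arr)
--     DEC = [1] * n  # Initialize all positions to 1
--
--     for j in range(n - 2, -1, -1):  # Process from right to left
--         # Find the maximum DEC[i] where i > j and arr[j] > arr[i]
--         max_val = 0
--         for i in range(j + 1, n):
--             if arr[j] > arr[i]:
--                 max_val = max(max_val, DEC[i])
--         DEC[j] = 1 + max_val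
--     return DEC
--
-- def find_longest_unimodal(arr):
--     """
--     Find the length of the longest unimodal subsequence.
--
--     Args:
--         arr: List of integers
--
--     Returns:
--         Integer representing the length of the longest unimodal subsequence,
--         or 0 if no valid unimodal subsequence exists
--     """
--     if len(arr) < 3:
--         return 0
--
--     INC = compute_inc(arr)
--     DEC = compute_dec(arr)
--
--     max_length = 0
--
--     # For each position j that could be a peak
--     for j in range(len(arr)):
--         # A valid peak must have both increasing and decreasing parts
--         if INC[j] > 1 and DEC[j] > 1:
--             unimodal_len = INC[j] + DEC[j] - 1
--             max_length = max(max_length, unimodal_len)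
--     return max_length
-- ===== SOURCE B (Python) =====
-- def find_longest_unimodal(arr):
--     """Length of the longest unimodal subsequence.
--
--     Patience-sorting per-position LIS lengths (O(n log n)); the decreasing
--     side is the same pass run on the reversed array.
--     """
--     if len(arr) < 3:
--         return 0
--
--     def lis_ends(a):
--         # out[j] = length of longest strictly increasing subsequence ending at j
--         tails = []
--         out = []
--         for x in a:
--             lo, hi = 0, len(tails)
--             while lo < hi:  # hand-written bisect_left(tails, x)
--                 mid = (lo + hi) // 2
--                 if tails[mid] < x:
--                     lo = mid + 1
--                 else:
--                     hi = mid
--             if lo == len(tails):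
--                 tails.append(x)
--             else:
--                 tails[lo] = x
--             out.append(lo + 1)
--         return out
--
--     inc = lis_ends(arr)
--     dec = lis_ends(arr[::-1])[::-1]
--     best = 0
--     for i, d in zip(inc, dec):
--         if i > 1 and d > 1:
--             best = max(best, i + d - 1)
--     return best
-- ===== Notes on version B (the rewrite author's own statement) =====
-- stated objective: faster
-- what changed: Replaces the quadratic per-position LIS/LDS DP (inner scan over all earlier/later indices) by patience sorting: a binary-searched 'tails' array yields each position's LIS length, and the decreasing side is the same pass run on the reversed array.
import Mathlib
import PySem

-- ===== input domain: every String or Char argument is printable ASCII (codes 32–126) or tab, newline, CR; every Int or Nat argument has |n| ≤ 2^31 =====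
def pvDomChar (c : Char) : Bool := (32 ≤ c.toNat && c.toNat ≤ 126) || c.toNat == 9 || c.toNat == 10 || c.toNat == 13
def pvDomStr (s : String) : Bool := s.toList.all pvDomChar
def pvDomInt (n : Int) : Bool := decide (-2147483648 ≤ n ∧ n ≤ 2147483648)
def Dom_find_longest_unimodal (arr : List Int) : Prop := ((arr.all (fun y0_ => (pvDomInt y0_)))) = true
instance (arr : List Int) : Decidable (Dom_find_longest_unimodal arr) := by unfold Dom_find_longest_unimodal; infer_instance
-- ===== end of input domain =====

-- B replaces A's O(n^2) per-position LIS/LDS scans by patience sorting (bisect on a tails list),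
-- running the same pass on the reversed array for the decreasing side; measured much faster.
-- ===== PORT A =====
-- A: quadratic DP — compute_inc / compute_dec per position, then combine over peaks.
def compute_inc (arr : List Int) : List Int :=
  let n : Int := (arr.length : Int)
  (PySem.List.pyRange 1 n 1).foldl (fun INC j =>
    let max_val := (PySem.List.pyRange 0 j 1).foldl (fun m i =>
      if PySem.List.pyGetD arr i 0 < PySem.List.pyGetD arr j 0 then
        max m (PySem.List.pyGetD INC i 0) else m) 0
    INC.set j.toNat (1 + max_val)) (List.replicate arr.length 1)

def compute_dec (arr : List Int) : List Int :=
  let n : Int := (arr.length : Int)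
  (PySem.List.pyRange (n - 2) (-1) (-1)).foldl (fun DEC j =>
    let max_val := (PySem.List.pyRange (j + 1) n 1).foldl (fun m i =>
      if PySem.List.pyGetD arr j 0 > PySem.List.pyGetD arr i 0 then
        max m (PySem.List.pyGetD DEC i 0) else m) 0
    DEC.set j.toNat (1 + max_val)) (List.replicate arr.length 1)

def find_longest_unimodal (arr : List Int) : Int :=
  if arr.length < 3 then 0 else
    let INC := compute_inc arr
    let DEC := compute_dec arr
    (PySem.List.pyRange 0 (arr.length : Int) 1).foldl (fun ml j =>
      if PySem.List.pyGetD INC j 0 > 1 ∧ PySem.List.pyGetD DEC j 0 > 1 then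
        max ml (PySem.List.pyGetD INC j 0 + PySem.List.pyGetD DEC j 0 - 1)
      else ml) 0


-- ===== PORT B =====
-- B: patience sorting. Source B's hand-written binary-search loop is exactly
-- bisect_left, ported as the prelude primitive PySem.List.bisectLeft.
def lis_ends (a : List Int) : List Int :=
  (a.foldl (fun (st : List Int × List Int) x =>
      let tails := st.1
      let out := st.2
      let lo := PySem.List.bisectLeft tails x
      let tails' := if lo = tails.length then tails ++ [x] else tails.set lo x
      (tails', out ++ [((lo : Int) + 1)])) ([], [])).2

def find_longest_unimodal_alt (arr : List Int) : Int :=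
  if arr.length < 3 then 0 else
    let inc := lis_ends arr
    let dec := (lis_ends arr.reverse).reverse
    (inc.zip dec).foldl (fun best p =>
      if p.1 > 1 ∧ p.2 > 1 then max best (p.1 + p.2 - 1) else best) 0


-- ===== PRECONDITION & SPEC =====
def Spec_find_longest_unimodal (arr : List Int) (out : Int) : Prop := out = find_longest_unimodal_alt arr
instance (arr : List Int) (out : Int) : Decidable (Spec_find_longest_unimodal arr out) := by unfold Spec_find_longest_unimodal; infer_instance

-- ===== CLAIM (what is proved, stated in full; the proofs are below) =====
def Claim_equal_find_longest_unimodal : Prop := ∀ (arr : List Int), Dom_find_longest_unimodal arr → Spec_find_longest_unimodal arr (find_longest_unimodal arr)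

-- ===== LEMMAS AND PROOFS =====

-- Abstract DP: dpM pre x = max dp-value among earlier (value, dp) pairs with value < x;
-- dpRun pre a = the dp values produced by processing a after prefix pre.
def dpM (pre : List (Int × Int)) (x : Int) : Int :=
  pre.foldl (fun m p => if p.1 < x then max m p.2 else m) 0

def dpRun (pre : List (Int × Int)) (a : List Int) : List Int :=
  match a with
  | [] => []
  | x :: a => (1 + dpM pre x) :: dpRun (pre ++ [(x, 1 + dpM pre x)]) a

lemma dpRun_length (a : List Int) : ∀ pre, (dpRun pre a).length = a.length := by
  induction a with
  | nil => intro pre; rfl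
  | cons x a ih => intro pre; simp [dpRun, ih]

lemma dpM_append_singleton (pre : List (Int × Int)) (q : Int × Int) (x : Int) :
    dpM (pre ++ [q]) x = if q.1 < x then max (dpM pre x) q.2 else dpM pre x := by
  simp [dpM, List.foldl_append]

lemma dpRun_append (a : List Int) : ∀ (pre : List (Int × Int)) (x : Int),
    dpRun pre (a ++ [x]) = dpRun pre a ++ [1 + dpM (pre ++ a.zip (dpRun pre a)) x] := by
  induction a with
  | nil => intro pre x; simp [dpRun]
  | cons y a ih =>
    intro pre x
    simp only [List.cons_append, dpRun, ih, List.zip_cons_cons, List.cons_append,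
      List.append_assoc]
    rfl

lemma dpM_perm {pre pre' : List (Int × Int)} (h : pre.Perm pre') (x : Int) :
    dpM pre x = dpM pre' x := by
  unfold dpM
  exact h.foldl_eq (rcomm := ⟨by
    intro m p q
    by_cases h1 : p.1 < x <;> by_cases h2 : q.1 < x <;>
      simp [h1, h2, max_comm, max_left_comm]⟩) 0

-- countP on a strictly sorted list is a threshold: t[j] < y iff j is below the count.
lemma cnt_lt_iff (t : List Int) (ht : t.Pairwise (· < ·)) (y : Int) :
    ∀ (j : Nat) (h : j < t.length), (t[j] < y ↔ j < t.countP (· < y)) := by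
  induction t with
  | nil => intro j h; simp at h
  | cons z t ih =>
    intro j h
    rcases List.pairwise_cons.mp ht with ⟨hz, ht'⟩
    by_cases hzy : z < y
    · cases j with
      | zero => simp [hzy]
      | succ j =>
        have := ih ht' j (by simpa using h)
        simp only [List.getElem_cons_succ, List.countP_cons, hzy]
        simpa [Nat.succ_lt_succ_iff] using this
    · have h0 : t.countP (· < y) = 0 := by
        rw [List.countP_eq_zero]
        intro b hb
        simp only [decide_eq_true_eq]
        exact fun hby => hzy (lt_trans (hz b hb) hby)
      cases j with
      | zero => simp [hzy, h0]
      | succ j =>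
        have hj : j < t.length := by simpa using h
        have hget : ¬ (t[j] < y) := fun hlt => hzy (lt_trans (hz _ (List.getElem_mem hj)) hlt)
        simp [hzy, h0, hget]

lemma bisect_eq_countP (t : List Int) (ht : t.Pairwise (· < ·)) (x : Int) :
    PySem.List.bisectLeft t x = t.countP (· < x) := by
  obtain ⟨hle, hlo, hhi⟩ := PySem.List.bisectLeft_spec t x (ht.imp le_of_lt)
  have hc : t.countP (· < x) ≤ t.length := List.countP_le_length
  by_contra hne
  rcases Nat.lt_or_ge (PySem.List.bisectLeft t x) (t.countP (· < x)) with hlt | hge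
  · have hb : PySem.List.bisectLeft t x < t.length := lt_of_lt_of_le hlt hc
    have := (cnt_lt_iff t ht x _ hb).mpr hlt
    exact absurd this (not_lt.mpr (hhi _ hb le_rfl))
  · have hlt : t.countP (· < x) < PySem.List.bisectLeft t x := by omega
    have hb : t.countP (· < x) < t.length := lt_of_lt_of_le hlt hle
    have := hlo _ hb hlt
    exact absurd ((cnt_lt_iff t ht x _ hb).mp this) (lt_irrefl _)

-- The updated tails list stays strictly sorted.
lemma tails_update_sorted (t : List Int) (ht : t.Pairwise (· < ·)) (x : Int) :
    (if PySem.List.bisectLeft t x = t.length then t ++ [x]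
     else t.set (PySem.List.bisectLeft t x) x).Pairwise (· < ·) := by
  obtain ⟨hle, hlo, hhi⟩ := PySem.List.bisectLeft_spec t x (ht.imp le_of_lt)
  set k := PySem.List.bisectLeft t x with hk
  have hs := List.pairwise_iff_getElem.mp ht
  by_cases hkl : k = t.length
  · simp only [hkl, reduceIte]
    rw [List.pairwise_iff_getElem]
    intro i j hi hj hij
    simp only [List.length_append, List.length_singleton] at hi hj
    by_cases hjt : j < t.length
    · rw [List.getElem_append_left (lt_trans hij hjt), List.getElem_append_left hjt]
      exact hs i j _ hjt hij
    · have hj' : j = t.length := by omega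
      have hit : i < t.length := by omega
      rw [List.getElem_append_left hit, List.getElem_append_right (by omega)]
      simp only [hj']
      simpa using hlo i hit (by omega)
  · have hkl' : k < t.length := lt_of_le_of_ne hle hkl
    simp only [if_neg hkl]
    rw [List.pairwise_iff_getElem]
    intro i j hi hj hij
    simp only [List.length_set] at hi hj
    rw [List.getElem_set, List.getElem_set]
    by_cases hik : k = i <;> by_cases hjk : k = j
    · omega
    · simp only [if_pos hik, if_neg hjk]
      exact lt_of_le_of_lt (hhi k hkl' le_rfl) (hs k j hkl' hj (by omega))
    · simp only [if_neg hik, if_pos hjk]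
      exact hlo i hi (by omega)
    · simp only [if_neg hik, if_neg hjk]
      exact hs i j hi hj hij

lemma threshold_unique (L c d : Nat) (hc : c ≤ L) (hd : d ≤ L)
    (h : ∀ j, j < L → (j < c ↔ j < d)) : c = d := by
  by_contra hne
  rcases Nat.lt_or_ge c d with hlt | hge
  · have := (h c (by omega)).mpr (by omega); omega
  · have hlt : d < c := by omega
    have := (h d (by omega)).mp (by omega); omega

-- How the count of elements < y changes when the tails list is updated at the bisect point.
lemma cnt_update (t : List Int) (ht : t.Pairwise (· < ·)) (x y : Int) :
    ((if PySem.List.bisectLeft t x = t.length then t ++ [x]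
      else t.set (PySem.List.bisectLeft t x) x).countP (· < y) : Int)
    = if x < y then max ((t.countP (· < y) : Nat) : Int) ((PySem.List.bisectLeft t x : Int) + 1)
      else ((t.countP (· < y) : Nat) : Int) := by
  obtain ⟨hle, hlo, hhi⟩ := PySem.List.bisectLeft_spec t x (ht.imp le_of_lt)
  set k := PySem.List.bisectLeft t x with hk
  set t' := if k = t.length then t ++ [x] else t.set k x with ht'
  have ht's : t'.Pairwise (· < ·) := tails_update_sorted t ht x
  have cl := cnt_lt_iff t ht y
  have cl' := cnt_lt_iff t' ht's y
  have hc : t.countP (· < y) ≤ t.length := List.countP_le_length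
  set c := t.countP (· < y) with hcdef
  set v : Nat := if x < y then max c (k + 1) else c with hv
  have hlen' : t'.length = if k = t.length then t.length + 1 else t.length := by
    by_cases hkl : k = t.length <;> simp [ht', hkl]
  have hveq : t'.countP (· < y) = v := by
    apply threshold_unique t'.length _ _ List.countP_le_length
    · rw [hlen']
      by_cases hkl : k = t.length <;> by_cases hxy : x < y <;>
        simp [hv, hkl, hxy] <;> omega
    · intro j hj
      rw [← cl' j hj]
      by_cases hkl : k = t.length
      · -- append case
        have hj' : j < t.length + 1 := by rw [hlen', if_pos hkl] at hj; exact hj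
        have htj : t'[j] = if hjl : j = t.length then x else t[j]'(by omega) := by
          by_cases hjl : j = t.length
          · rw [dif_pos hjl]
            simp only [ht', if_pos hkl]
            rw [List.getElem_append_right (by omega)]
            simp [hjl]
          · rw [dif_neg hjl]
            simp only [ht', if_pos hkl]
            exact List.getElem_append_left (by omega)
        rw [htj]
        by_cases hjl : j = t.length
        · rw [dif_pos hjl, hv]
          by_cases hxy : x < y
          · rw [if_pos hxy]
            constructor
            · intro _; omega
            · intro _; exact hxy
          · rw [if_neg hxy]
            constructor
            · intro h; exact absurd h hxy
            · intro h; omega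
        · rw [dif_neg hjl, hv]
          have hjt : j < t.length := by omega
          by_cases hxy : x < y
          · rw [if_pos hxy]
            constructor
            · intro _; omega
            · intro _; exact lt_trans (hlo j hjt (by omega)) hxy
          · rw [if_neg hxy]
            exact cl j hjt
      · -- set case
        have hkl' : k < t.length := lt_of_le_of_ne hle hkl
        have hj' : j < t.length := by rw [hlen', if_neg hkl] at hj; exact hj
        have htj : t'[j] = if k = j then x else t[j]'hj' := by
          simp only [ht', if_neg hkl, List.getElem_set]
        rw [htj]
        by_cases hjk : k = j
        · rw [if_pos hjk, hv]
          by_cases hxy : x < y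
          · rw [if_pos hxy]
            constructor
            · intro _; omega
            · intro _; exact hxy
          · rw [if_neg hxy]
            constructor
            · intro h; exact absurd h hxy
            · intro hkc
              subst hjk
              exact absurd (lt_of_le_of_lt (hhi k hkl' le_rfl)
                ((cl k hkl').mpr hkc)) hxy
        · rw [if_neg hjk, hv]
          by_cases hxy : x < y
          · rw [if_pos hxy]
            constructor
            · intro h
              have := (cl j hj').mp h; omega
            · intro h
              by_cases hjc : j < c
              · exact (cl j hj').mpr hjc
              · have hjk' : j < k := by omega
                exact lt_trans (hlo j hj' hjk') hxy
          · rw [if_neg hxy]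
            exact cl j hj'
  rw [hveq]
  by_cases hxy : x < y
  · simp only [hv, hxy, if_true]
    push_cast [Nat.cast_max]
    ring_nf
  · simp only [hv, hxy, if_false]

-- B's fold produces exactly the DP values.
lemma lis_go (a : List Int) : ∀ (tails out : List Int) (pre : List (Int × Int)),
    tails.Pairwise (· < ·) →
    (∀ y : Int, ((tails.countP (· < y) : Nat) : Int) = dpM pre y) →
    (a.foldl (fun (st : List Int × List Int) x =>
      let tails := st.1
      let out := st.2
      let lo := PySem.List.bisectLeft tails x
      let tails' := if lo = tails.length then tails ++ [x] else tails.set lo x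
      (tails', out ++ [((lo : Int) + 1)])) (tails, out)).2 = out ++ dpRun pre a := by
  induction a with
  | nil => intro tails out pre _ _; simp [dpRun]
  | cons x a ih =>
    intro tails out pre hs hinv
    have hk : ((PySem.List.bisectLeft tails x : Nat) : Int) = dpM pre x := by
      rw [bisect_eq_countP tails hs x]; exact hinv x
    have hval : ((PySem.List.bisectLeft tails x : Nat) : Int) + 1 = 1 + dpM pre x := by
      rw [hk]; ring
    have h1 : dpRun pre (x :: a) = (1 + dpM pre x) :: dpRun (pre ++ [(x, 1 + dpM pre x)]) a := rfl
    simp only [List.foldl_cons]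
    rw [ih (if PySem.List.bisectLeft tails x = tails.length then tails ++ [x]
          else tails.set (PySem.List.bisectLeft tails x) x)
        (out ++ [((PySem.List.bisectLeft tails x : Nat) : Int) + 1])
        (pre ++ [(x, 1 + dpM pre x)]) (tails_update_sorted tails hs x) ?_]
    · rw [h1, hval]
      simp
    · intro y
      rw [dpM_append_singleton, cnt_update tails hs x y, hinv y, ← hval, hk]

lemma lis_ends_eq (a : List Int) : lis_ends a = dpRun [] a := by
  have := lis_go a [] [] [] (List.Pairwise.nil) (fun y => by simp [dpM])
  simpa [lis_ends] using this

-- Bridge: a fold over indices with a pair of lookups is a fold over the mapped pair list.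
lemma foldl_if_pair (l : List Int) (g1 g2 : Int → Int) (X : Int) (init : Int) :
    l.foldl (fun mx i => if g1 i < X then max mx (g2 i) else mx) init
    = (l.map (fun i => (g1 i, g2 i))).foldl (fun mx p => if p.1 < X then max mx p.2 else mx) init := by
  rw [List.foldl_map]

-- One step of A's compute_inc loop, on the invariant state.
lemma inc_step (arr : List Int) (m : Nat) (hmn : m < arr.length) (S : List Int)
    (hSdef : S = dpRun [] (arr.take m) ++ List.replicate (arr.length - m) 1) :
    S.set ((m : Int)).toNat (1 + (PySem.List.pyRange 0 (m : Int) 1).foldl (fun mx i =>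
        if PySem.List.pyGetD arr i 0 < PySem.List.pyGetD arr (m : Int) 0 then
          max mx (PySem.List.pyGetD S i 0) else mx) 0)
    = dpRun [] (arr.take (m + 1)) ++ List.replicate (arr.length - (m + 1)) 1 := by
  have hD : (dpRun [] (arr.take m)).length = m := by
    rw [dpRun_length]; simp; omega
  have hSlen : S.length = arr.length := by
    simp [hSdef, hD]; omega
  have hmap : (PySem.List.pyRange 0 (m : Int) 1).map
      (fun i => (PySem.List.pyGetD arr i 0, PySem.List.pyGetD S i 0))
      = (arr.take m).zip (dpRun [] (arr.take m)) := by
    apply List.ext_getElem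
    · simp [PySem.List.length_pyRange_one, hD]
      omega
    · intro i h1 h2
      have hi : i < m := by
        simpa [PySem.List.length_pyRange_one] using h1
      rw [List.getElem_map, PySem.List.getElem_pyRange_one]
      rw [List.getElem_zip]
      congr 1
      · rw [PySem.List.pyGetD_eq_getElem arr 0 (by omega) (by push_cast; omega)]
        rw [List.getElem_take]
        congr 1
        omega
      · rw [PySem.List.pyGetD_eq_getElem S 0 (by omega) (by rw [hSlen]; push_cast; omega)]
        have h0 : ((0:Int) + (i:Int)).toNat = i := by omega
        simp only [hSdef, h0]
        exact List.getElem_append_left (by rw [hD]; exact hi)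
  have hX : PySem.List.pyGetD arr (m : Int) 0 = arr[m] := by
    rw [PySem.List.pyGetD_eq_getElem arr 0 (by omega) (by push_cast; omega)]
    simp
  rw [foldl_if_pair _ (fun i => PySem.List.pyGetD arr i 0) (fun i => PySem.List.pyGetD S i 0)]
  rw [hmap]
  have htake : arr.take (m + 1) = arr.take m ++ [arr[m]] := by
    rw [List.take_add_one]
    simp [List.getElem?_eq_getElem hmn]
  rw [htake, dpRun_append]
  simp only [List.nil_append]
  rw [← hX]
  have hrep : List.replicate (arr.length - m) (1 : Int)
      = 1 :: List.replicate (arr.length - (m + 1)) 1 := by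
    have : arr.length - m = (arr.length - (m + 1)) + 1 := by omega
    rw [this, List.replicate_succ]
  rw [hSdef, List.set_append, if_neg (by rw [hD]; simp)]
  rw [hrep]
  have : ((m : Int)).toNat - (dpRun [] (arr.take m)).length = 0 := by rw [hD]; simp
  rw [this, List.set_cons_zero]
  simp [dpM]

lemma replicate_split (k : Nat) (hk : 1 ≤ k) :
    List.replicate k (1 : Int) = [1] ++ List.replicate (k - 1) 1 := by
  cases k with
  | zero => omega
  | succ k => simp [List.replicate_succ]

lemma inc_loop (arr : List Int) (hn : 1 ≤ arr.length) : ∀ (mm : Nat), 1 ≤ mm → mm ≤ arr.length →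
    (PySem.List.pyRange 1 (mm : Int) 1).foldl (fun INC j =>
      let max_val := (PySem.List.pyRange 0 j 1).foldl (fun m i =>
        if PySem.List.pyGetD arr i 0 < PySem.List.pyGetD arr j 0 then
          max m (PySem.List.pyGetD INC i 0) else m) 0
      INC.set j.toNat (1 + max_val)) (List.replicate arr.length 1)
    = dpRun [] (arr.take mm) ++ List.replicate (arr.length - mm) 1 := by
  intro mm
  induction mm with
  | zero => intro h; omega
  | succ mm ih =>
    intro _ hle
    by_cases h0 : mm = 0
    · subst h0
      rw [show (((0 + 1 : Nat)) : Int) = 1 by norm_num]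
      rw [PySem.List.pyRange_one_eq_nil le_rfl]
      simp only [List.foldl_nil]
      have htake : arr.take (0 + 1) = [arr[0]'(by omega)] := by
        rw [List.take_add_one]
        simp [List.getElem?_eq_getElem (by omega : 0 < arr.length)]
      rw [htake]
      have hdp : dpRun [] [arr[0]'(by omega)] = [1] := by simp [dpRun, dpM]
      rw [hdp, replicate_split arr.length hn]
    · have h1' : 1 ≤ mm := by omega
      have hlt : mm < arr.length := by omega
      have hcast : ((mm + 1 : Nat) : Int) = (mm : Int) + 1 := by push_cast; ring
      rw [hcast, PySem.List.pyRange_one_succ_right (by exact_mod_cast h1')]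
      rw [List.foldl_append, ih h1' (by omega)]
      simp only [List.foldl_cons, List.foldl_nil]
      exact inc_step arr mm hlt _ rfl

lemma compute_inc_eq (arr : List Int) (hn : 1 ≤ arr.length) :
    compute_inc arr = dpRun [] arr := by
  have h := inc_loop arr hn arr.length hn le_rfl
  rw [List.take_length] at h
  simpa [compute_inc] using h

lemma dec_range_snoc (a b : Int) (h : b ≤ a) :
    PySem.List.pyRange a (b - 1) (-1) = PySem.List.pyRange a b (-1) ++ [b] := by
  rw [PySem.List.pyRange_neg_one_eq_reverse, PySem.List.pyRange_neg_one_eq_reverse]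
  rw [show b - 1 + 1 = b by ring]
  rw [PySem.List.pyRange_one_cons (by omega)]
  simp

-- One step of A's compute_dec loop, on the invariant state.
lemma dec_step (arr : List Int) (t : Nat) (htn : t + 1 ≤ arr.length - 1)
    (hn : 2 ≤ arr.length) (S : List Int)
    (hSdef : S = List.replicate (arr.length - 1 - t) 1
      ++ (dpRun [] (arr.reverse.take (t + 1))).reverse) :
    S.set (((arr.length : Int) - 2 - (t : Int))).toNat
      (1 + (PySem.List.pyRange ((arr.length : Int) - 2 - (t : Int) + 1) (arr.length : Int) 1).foldl
        (fun mx i =>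
          if PySem.List.pyGetD arr ((arr.length : Int) - 2 - (t : Int)) 0 > PySem.List.pyGetD arr i 0 then
            max mx (PySem.List.pyGetD S i 0) else mx) 0)
    = List.replicate (arr.length - 1 - (t + 1)) 1
      ++ (dpRun [] (arr.reverse.take (t + 2))).reverse := by
  simp only [gt_iff_lt]
  have hrevlen : arr.reverse.length = arr.length := by simp
  have hvals : (dpRun [] (arr.reverse.take (t + 1))).length = t + 1 := by
    rw [dpRun_length]; simp; omega
  subst hSdef
  have hSlen : (List.replicate (arr.length - 1 - t) (1:Int)
      ++ (dpRun [] (arr.reverse.take (t + 1))).reverse).length = arr.length := by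
    simp [hvals]; omega
  have hb : (((arr.length : Int) - 2 - (t : Int))).toNat = arr.length - 2 - t := by omega
  have hX : PySem.List.pyGetD arr ((arr.length : Int) - 2 - (t : Int)) 0
      = arr.reverse[t + 1]'(by omega) := by
    rw [PySem.List.pyGetD_eq_getElem arr 0 (by omega) (by push_cast; omega)]
    rw [List.getElem_reverse]
    congr 1
    omega
  have hmap : (PySem.List.pyRange ((arr.length : Int) - 2 - (t : Int) + 1) (arr.length : Int) 1).map
      (fun i => (PySem.List.pyGetD arr i 0, PySem.List.pyGetD (List.replicate (arr.length - 1 - t) (1:Int) ++ (dpRun [] (arr.reverse.take (t + 1))).reverse) i 0))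
      = (((arr.reverse.take (t + 1)).zip (dpRun [] (arr.reverse.take (t + 1)))).reverse) := by
    apply List.ext_getElem
    · simp [PySem.List.length_pyRange_one, hvals]
      omega
    · intro k h1 h2
      have hk : k < t + 1 := by
        simp [PySem.List.length_pyRange_one] at h1
        omega
      rw [List.getElem_map, PySem.List.getElem_pyRange_one]
      rw [List.getElem_reverse, List.getElem_zip]
      have hzl : ((arr.reverse.take (t + 1)).zip (dpRun [] (arr.reverse.take (t + 1)))).length
          = t + 1 := by
        simp [hvals]; omega
      have hidx : ((arr.reverse.take (t + 1)).zip (dpRun [] (arr.reverse.take (t + 1)))).length - 1 - k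
          = t - k := by omega
      simp only [hidx]
      congr 1
      · rw [PySem.List.pyGetD_eq_getElem arr 0 (by omega) (by push_cast; omega)]
        rw [List.getElem_take, List.getElem_reverse]
        congr 1
        omega
      · rw [PySem.List.pyGetD_eq_getElem (List.replicate (arr.length - 1 - t) (1:Int) ++ (dpRun [] (arr.reverse.take (t + 1))).reverse) 0 (by omega) (by rw [hSlen]; push_cast; omega)]
        have h0 : (((arr.length : Int) - 2 - (t : Int) + 1 + (k : Int))).toNat
            = (arr.length - 1 - t) + k := by omega
        simp only [h0]
        rw [List.getElem_append_right (by simp)]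
        rw [List.getElem_reverse]
        congr 1
        simp only [List.length_replicate, hvals]
        omega
  rw [foldl_if_pair _ (fun i => PySem.List.pyGetD arr i 0) (fun i => PySem.List.pyGetD (List.replicate (arr.length - 1 - t) (1:Int) ++ (dpRun [] (arr.reverse.take (t + 1))).reverse) i 0)]
  rw [hmap, hX]
  have hperm := dpM_perm (List.reverse_perm
    ((arr.reverse.take (t + 1)).zip (dpRun [] (arr.reverse.take (t + 1)))))
    (arr.reverse[t + 1]'(by omega))
  rw [show ((arr.reverse.take (t + 1)).zip (dpRun [] (arr.reverse.take (t + 1)))).reverse.foldl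
      (fun mx p => if p.1 < arr.reverse[t + 1]'(by omega) then max mx p.2 else mx) 0
      = dpM ((arr.reverse.take (t + 1)).zip (dpRun [] (arr.reverse.take (t + 1)))).reverse
        (arr.reverse[t + 1]'(by omega)) from rfl]
  rw [hperm]
  have htake : arr.reverse.take (t + 2) = arr.reverse.take (t + 1) ++ [arr.reverse[t + 1]'(by omega)] := by
    rw [List.take_add_one]
    simp [List.getElem?_eq_getElem (by omega : t + 1 < arr.reverse.length)]
  rw [htake, dpRun_append]
  simp only [List.nil_append, List.reverse_append, List.reverse_cons, List.reverse_nil,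
    List.nil_append, List.singleton_append]
  rw [hb]
  have hrep : List.replicate (arr.length - 1 - t) (1 : Int)
      = List.replicate (arr.length - 1 - (t + 1)) 1 ++ [1] := by
    have : arr.length - 1 - t = (arr.length - 1 - (t + 1)) + 1 := by omega
    rw [this, List.replicate_succ']
  rw [hrep, List.set_append, if_pos (by simp; omega), List.set_append,
    if_neg (by simp; omega)]
  have : arr.length - 2 - t - (List.replicate (arr.length - 1 - (t + 1)) (1:Int)).length = 0 := by
    simp; omega
  rw [this, List.set_cons_zero]
  simp

lemma dec_loop (arr : List Int) (hn : 2 ≤ arr.length) : ∀ (t : Nat), t ≤ arr.length - 1 →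
    (PySem.List.pyRange ((arr.length : Int) - 2) ((arr.length : Int) - 2 - (t : Int)) (-1)).foldl
      (fun DEC j =>
        let max_val := (PySem.List.pyRange (j + 1) (arr.length : Int) 1).foldl (fun m i =>
          if PySem.List.pyGetD arr j 0 > PySem.List.pyGetD arr i 0 then
            max m (PySem.List.pyGetD DEC i 0) else m) 0
        DEC.set j.toNat (1 + max_val)) (List.replicate arr.length 1)
    = List.replicate (arr.length - 1 - t) 1 ++ (dpRun [] (arr.reverse.take (t + 1))).reverse := by
  intro t
  induction t with
  | zero =>
    intro _
    rw [show ((arr.length : Int) - 2 - ((0 : Nat) : Int)) = (arr.length : Int) - 2 by push_cast; ring]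
    rw [PySem.List.pyRange_neg_one_eq_nil le_rfl]
    simp only [List.foldl_nil]
    have htake : arr.reverse.take (0 + 1) = [arr.reverse[0]'(by simp; omega)] := by
      rw [List.take_add_one]
      simp [List.getElem?_eq_getElem (by simp; omega : 0 < arr.reverse.length)]
    rw [htake]
    have hdp : dpRun [] [arr.reverse[0]'(by simp; omega)] = [1] := by simp [dpRun, dpM]
    rw [hdp]
    have : List.replicate arr.length (1 : Int)
        = List.replicate (arr.length - 1) 1 ++ [1] := by
      have h : arr.length = (arr.length - 1) + 1 := by omega
      rw [h, List.replicate_succ']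
      simp
    rw [this]
    rfl
  | succ t ih =>
    intro hle
    have hcast : ((arr.length : Int) - 2 - ((t + 1 : Nat) : Int))
        = ((arr.length : Int) - 2 - (t : Int)) - 1 := by push_cast; ring
    rw [hcast, dec_range_snoc _ _ (by omega)]
    rw [List.foldl_append, ih (by omega)]
    simp only [List.foldl_cons, List.foldl_nil]
    exact dec_step arr t (by omega) hn _ rfl

lemma compute_dec_eq (arr : List Int) (hn : 2 ≤ arr.length) :
    compute_dec arr = (dpRun [] arr.reverse).reverse := by
  have h := dec_loop arr hn (arr.length - 1) le_rfl
  have hc : ((arr.length : Int) - 2 - ((arr.length - 1 : Nat) : Int)) = -1 := by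
    push_cast [Nat.cast_sub (by omega : 1 ≤ arr.length)]
    ring
  rw [hc] at h
  have htl : arr.reverse.take ((arr.length - 1) + 1) = arr.reverse := by
    have : (arr.length - 1) + 1 = arr.reverse.length := by simp; omega
    rw [this, List.take_length]
  rw [htl] at h
  have hz : arr.length - 1 - (arr.length - 1) = 0 := by omega
  rw [hz] at h
  simpa [compute_dec] using h

lemma foldl_range_zip (u v : List Int) (huv : u.length = v.length)
    (f : Int → Int × Int → Int) (init : Int) :
    (PySem.List.pyRange 0 (u.length : Int) 1).foldl
      (fun acc j => f acc (PySem.List.pyGetD u j 0, PySem.List.pyGetD v j 0)) init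
    = (u.zip v).foldl f init := by
  rw [← List.foldl_map (f := fun j => (PySem.List.pyGetD u j 0, PySem.List.pyGetD v j 0)) (g := f)]
  congr 1
  apply List.ext_getElem
  · simp [PySem.List.length_pyRange_one]
    omega
  · intro j h1 h2
    have hj : j < u.length := by
      simpa [PySem.List.length_pyRange_one] using h1
    rw [List.getElem_map, PySem.List.getElem_pyRange_one, List.getElem_zip]
    have h0 : ((0 : Int) + (j : Int)) = (j : Int) := by ring
    rw [h0]
    congr 1
    · rw [PySem.List.pyGetD_eq_getElem u 0 (by omega) (by push_cast; omega)]
      simp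
    · rw [PySem.List.pyGetD_eq_getElem v 0 (by omega) (by push_cast; omega)]
      simp

-- ===== VERDICT (by name: the statement is the Claim_ definition above) =====
theorem find_longest_unimodal_spec : Claim_equal_find_longest_unimodal := by
  unfold Claim_equal_find_longest_unimodal Spec_find_longest_unimodal
  intro arr _
  by_cases h3 : arr.length < 3
  · simp [find_longest_unimodal, find_longest_unimodal_alt, h3]
  · unfold find_longest_unimodal find_longest_unimodal_alt
    rw [if_neg h3, if_neg h3]
    rw [compute_inc_eq arr (by omega), compute_dec_eq arr (by omega), lis_ends_eq, lis_ends_eq]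
    have hlen : (dpRun [] arr).length = ((dpRun [] arr.reverse).reverse).length := by
      simp [dpRun_length]
    have hgoal := foldl_range_zip (dpRun [] arr) ((dpRun [] arr.reverse).reverse) hlen
      (fun acc p => if p.1 > 1 ∧ p.2 > 1 then max acc (p.1 + p.2 - 1) else acc) 0
    rw [show ((dpRun [] arr).length : Int) = (arr.length : Int) by
      simp [dpRun_length]] at hgoal
    exact hgoal
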